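-- pv_equiv track=rewrite | github.com/Olivera2708/Codeforces | #905/prvi.py | izracunaj
-- ===== SOURCE A (Python) =====
-- def izracunaj(broj):
--     sum = 0
--     trenutni = 1
--     for br in broj:
--         if br == 0:
--             br = 10
--         sum += abs(br - trenutni) + 1
--         trenutni = br
--     return sum
-- ===== SOURCE B (Python) =====
-- def izracunaj(broj):
--     # Divide and conquer: total = per-press count + adjacent-distance sum over
--     # vals = [1] + mapped positions, computed by recursively splitting the index range.
--     vals = [1] + [br if br else 10 for br in broj]
--
--     def dist(lo, hi):
--         # sum of abs(vals[i+1] - vals[i]) for lo <= i < hi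
--         if hi - lo <= 0:
--             return 0
--         if hi - lo == 1:
--             return abs(vals[hi] - vals[lo])
--         mid = (lo + hi) // 2
--         return dist(lo, mid) + dist(mid, hi)
--
--     return dist(0, len(broj)) + len(broj)
-- ===== Notes on version B (the rewrite author's own statement) =====
-- stated objective: alternative
-- what changed: Replaces A's single left-to-right loop with running state (sum, trenutni) by a divide-and-conquer recursion: the adjacent-distance total over the sentinel-prefixed position list is computed by recursively splitting the index range at its midpoint and summing the two halves, plus len(broj) for the per-press +1.
import Mathlib
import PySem

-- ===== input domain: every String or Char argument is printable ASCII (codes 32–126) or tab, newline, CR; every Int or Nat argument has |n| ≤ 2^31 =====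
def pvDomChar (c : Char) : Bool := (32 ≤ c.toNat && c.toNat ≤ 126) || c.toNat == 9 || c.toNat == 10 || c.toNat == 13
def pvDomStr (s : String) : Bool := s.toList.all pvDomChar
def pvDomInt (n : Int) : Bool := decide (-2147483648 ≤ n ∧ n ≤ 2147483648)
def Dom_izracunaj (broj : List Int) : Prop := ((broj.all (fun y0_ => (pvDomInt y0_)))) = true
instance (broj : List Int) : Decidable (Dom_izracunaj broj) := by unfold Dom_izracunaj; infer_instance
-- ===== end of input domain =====

-- B replaces A's running-state loop by a divide-and-conquer recursion over the index range of the sentinel-prefixed position list (objective: alternative).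


-- ===== PORT A =====
def izracunaj (broj : List Int) : Int :=
  (broj.foldl (fun (st : Int × Int) br =>
    let br := if br == 0 then 10 else br
    (st.1 + (br - st.2).natAbs + 1, br)) (0, 1)).1

-- ===== PORT B =====
-- dcDist vals lo hi = sum of |vals[i+1] - vals[i]| for lo ≤ i < hi, by midpoint splitting
-- (indices are always in range in izracunaj_alt, so getD is exact for Python's vals[i]).
def dcDist (vals : List Int) (lo hi : Nat) : Int :=
  if _h1 : hi ≤ lo then 0
  else if _h2 : hi - lo = 1 then ((vals.getD hi 0 - vals.getD lo 0).natAbs : Int)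
  else dcDist vals lo ((lo + hi) / 2) + dcDist vals ((lo + hi) / 2) hi
termination_by hi - lo
decreasing_by all_goals omega

def izracunaj_alt (broj : List Int) : Int :=
  let vals := 1 :: broj.map (fun br => if br == 0 then 10 else br)
  dcDist vals 0 broj.length + broj.length

-- ===== PRECONDITION & SPEC =====
def Spec_izracunaj (broj : List Int) (out : Int) : Prop := out = izracunaj_alt broj
instance (broj : List Int) (out : Int) : Decidable (Spec_izracunaj broj out) := by unfold Spec_izracunaj; infer_instance

-- ===== CLAIM (what is proved, stated in full; the proofs are below) =====
def Claim_equal_izracunaj : Prop := ∀ (broj : List Int), Dom_izracunaj broj → Spec_izracunaj broj (izracunaj broj)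

-- ===== LEMMAS AND PROOFS =====

-- proof-side bridge: linear adjacent-pair sum
def pairSum : List Int → Int
  | a :: b :: rest => ((a - b).natAbs : Int) + pairSum (b :: rest)
  | _ => 0

theorem izracunaj_loop (l : List Int) (s t : Int) :
    (l.foldl (fun (st : Int × Int) br =>
      let br := if br == 0 then 10 else br
      (st.1 + (br - st.2).natAbs + 1, br)) (s, t)).1
    = s + pairSum (t :: l.map (fun br => if br == 0 then 10 else br)) + l.length := by
  induction l generalizing s t with
  | nil => simp [pairSum]
  | cons x xs ih =>
    simp only [List.foldl_cons, List.map_cons, pairSum, ih, List.length_cons]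
    push_cast
    rw [abs_sub_comm]
    ring

theorem pairSum_eq_sum (l : List Int) :
    pairSum l = ∑ i ∈ Finset.range (l.length - 1),
      ((l.getD (i + 1) 0 - l.getD i 0).natAbs : Int) := by
  induction l with
  | nil => simp [pairSum]
  | cons a l ih =>
    cases l with
    | nil => simp [pairSum]
    | cons b rest =>
      show ((a - b).natAbs : Int) + pairSum (b :: rest) = _
      rw [ih]
      simp only [List.length_cons]
      rw [show (rest.length + 1 + 1) - 1 = rest.length + 1 by omega,
        Finset.sum_range_succ']
      simp only [List.getD_cons_succ, List.getD_cons_zero]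
      push_cast
      rw [abs_sub_comm b a]
      ring

theorem dcDist_eq_sum (vals : List Int) (lo hi : Nat) :
    dcDist vals lo hi = ∑ i ∈ Finset.Ico lo hi,
      ((vals.getD (i + 1) 0 - vals.getD i 0).natAbs : Int) := by
  induction lo, hi using dcDist.induct with
  | case1 lo hi h =>
    have he : Finset.Ico lo hi = ∅ := Finset.Ico_eq_empty (by omega)
    rw [dcDist, dif_pos h, he]
    simp
  | case2 lo hi h1 h2 =>
    rw [dcDist]
    simp only [dif_neg h1, dif_pos h2]
    have : hi = lo + 1 := by omega
    subst this
    simp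
  | case3 lo hi h1 h2 ih1 ih2 =>
    rw [dcDist]
    simp only [dif_neg h1, dif_neg h2]
    rw [ih1, ih2, Finset.sum_Ico_consecutive]
    · omega
    · omega

-- ===== VERDICT (by name: the statement is the Claim_ definition above) =====
theorem izracunaj_spec : Claim_equal_izracunaj := by
  intro broj _
  unfold Spec_izracunaj izracunaj
  simp only [izracunaj_alt]
  rw [izracunaj_loop, dcDist_eq_sum, ← Finset.range_eq_Ico,
    ← show (1 :: broj.map (fun br => if br == 0 then 10 else br)).length - 1 = broj.length by
      simp,
    ← pairSum_eq_sum]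
  ring
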